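-- pv_equiv track=rewrite | github.com/PostHog/posthog-foss | products/experiments/backend/variant_distribution.py | even_distribution
-- ===== SOURCE A (Python) =====
-- def even_distribution(variant_count: int) -> list[int]:
--     """
--     Auto-even split for `variant_count` variants. Mirrors `percentageDistribution`
--     in frontend/src/scenes/experiments/utils.ts.
--
--     Examples:
--       - 2 variants → [50, 50]
--       - 3 variants → [34, 33, 33]
--       - 7 variants → [15, 15, 14, 14, 14, 14, 14]
--     """
--     if variant_count <= 0:
--         return []
--     base = 100 // variant_count
--     percentages = [base] * variant_count
--     remaining = 100 - base * variant_count
--     for i in range(remaining):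
--         percentages[i] += 1
--     return percentages
-- ===== SOURCE B (Python) =====
-- def even_distribution(variant_count: int) -> list[int]:
--     if variant_count <= 0:
--         return []
--     # closed form per slot: slot i gets ceil((100 - i) / variant_count + stagger),
--     # concretely (99 + variant_count - i) // variant_count, which is base+1 for
--     # the first 100 % variant_count slots and base afterwards.
--     return [(99 + variant_count - i) // variant_count for i in range(variant_count)]
-- ===== Notes on version B (the rewrite author's own statement) =====
-- stated objective: alternative
-- what changed: Replaces A's allocate-then-mutate scheme (fill with base, then increment a prefix) by a single comprehension computing each slot independently from a per-index closed-form floor-division formula (99 + n - i) // n; no base/remaining variables, no mutation, no block construction.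
import Mathlib
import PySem

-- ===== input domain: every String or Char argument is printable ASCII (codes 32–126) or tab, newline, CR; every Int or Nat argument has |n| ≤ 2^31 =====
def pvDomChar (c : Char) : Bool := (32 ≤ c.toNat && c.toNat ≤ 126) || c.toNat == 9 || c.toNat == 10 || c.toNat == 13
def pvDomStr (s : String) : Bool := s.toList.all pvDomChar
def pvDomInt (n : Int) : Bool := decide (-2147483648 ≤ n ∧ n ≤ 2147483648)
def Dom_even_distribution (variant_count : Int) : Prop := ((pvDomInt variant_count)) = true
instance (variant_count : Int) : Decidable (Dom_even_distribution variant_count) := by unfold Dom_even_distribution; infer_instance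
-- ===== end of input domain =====

-- B computes every slot independently by the closed-form formula (99 + n - i) // n instead of
-- A's fill-with-base-then-increment-a-prefix construction; objective: alternative (same cost).

-- ===== PORT A =====
def even_distribution (variant_count : Int) : List Int :=
  if variant_count ≤ 0 then []
  else
    let base := PySem.Int.floordiv 100 variant_count
    let percentages := List.replicate variant_count.toNat base
    let remaining := 100 - base * variant_count
    (PySem.List.pyRange 0 remaining 1).foldl
      (fun ps i => ps.set i.toNat (ps.getD i.toNat 0 + 1)) percentages

-- ===== PORT B =====
def even_distribution_alt (variant_count : Int) : List Int :=
  if variant_count ≤ 0 then []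
  else
    (PySem.List.pyRange 0 variant_count 1).map
      (fun i => PySem.Int.floordiv (99 + variant_count - i) variant_count)

-- ===== PRECONDITION & SPEC =====
def Spec_even_distribution (variant_count : Int) (out : List Int) : Prop := out = even_distribution_alt variant_count
instance (variant_count : Int) (out : List Int) : Decidable (Spec_even_distribution variant_count out) := by unfold Spec_even_distribution; infer_instance

-- ===== CLAIM (what is proved, stated in full; the proofs are below) =====
def Claim_equal_even_distribution : Prop := ∀ (variant_count : Int), Dom_even_distribution variant_count → Spec_even_distribution variant_count (even_distribution variant_count)

-- ===== LEMMAS AND PROOFS =====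

-- After incrementing indices 0..r-1 the list is replicate r (b+1) ++ replicate (n-r) b;
-- stated over the remaining range [k, k+r).
lemma incr_fold_blocks (b : Int) (r : Nat) : ∀ (k n : Nat), k + r ≤ n →
    (PySem.List.pyRange (k : Int) ((k : Int) + r) 1).foldl
      (fun ps i => ps.set i.toNat (ps.getD i.toNat 0 + 1))
      (List.replicate k (b + 1) ++ List.replicate (n - k) b)
    = List.replicate (k + r) (b + 1) ++ List.replicate (n - (k + r)) b := by
  induction r with
  | zero =>
    intro k n _
    simp [PySem.List.pyRange_one_eq_nil]
  | succ r ih =>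
    intro k n hkn
    rw [PySem.List.pyRange_one_cons (by push_cast; omega : (k : Int) < k + (r + 1 : Nat))]
    simp only [List.foldl_cons]
    have hset : (List.replicate k (b + 1) ++ List.replicate (n - k) b).set
        (Int.toNat (k : Int)) ((List.replicate k (b + 1) ++ List.replicate (n - k) b).getD (Int.toNat (k : Int)) 0 + 1)
        = List.replicate (k + 1) (b + 1) ++ List.replicate (n - (k + 1)) b := by
      have hk : Int.toNat (k : Int) = k := Int.toNat_natCast k
      have hnk : n - k = (n - (k + 1)) + 1 := by omega
      rw [hk, hnk, List.replicate_succ]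
      rw [List.getD_eq_getElem?_getD, List.getElem?_append_right (by simp)]
      simp [List.replicate_succ' (n := k)]
    rw [hset]
    have hrange : (k : Int) + 1 = ((k + 1 : Nat) : Int) := by push_cast; ring
    have hend : (k : Int) + (r + 1 : Nat) = ((k + 1 : Nat) : Int) + r := by push_cast; ring
    rw [hrange, hend]
    have e1 : k + 1 + r = k + (r + 1) := by omega
    have e2 : n - (k + 1) - r = n - (k + (r + 1)) := by omega
    have := ih (k + 1) n (by omega)
    rw [this, e1]

-- B's per-index formula evaluated at slot i.
lemma formula_val (n b m i : Int) (hn : 0 < n) (h100 : b * n + m = 100)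
    (hm0 : 0 ≤ m) (hmlt : m < n) (hi0 : 0 ≤ i) (hilt : i < n) :
    PySem.Int.floordiv (99 + n - i) n = if i < m then b + 1 else b := by
  split_ifs with h
  · rw [PySem.Int.floordiv_eq_iff_of_pos hn]
    constructor <;> nlinarith
  · rw [PySem.Int.floordiv_eq_iff_of_pos hn]
    constructor <;> nlinarith

-- ===== VERDICT (by name: the statement is the Claim_ definition above) =====
theorem even_distribution_spec : Claim_equal_even_distribution := by
  intro n hdom
  unfold Spec_even_distribution even_distribution even_distribution_alt
  by_cases h : n ≤ 0
  · simp [h]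
  · simp only [if_neg h]
    have hn : 0 < n := by omega
    have hdm := PySem.Int.floordiv_mul_add_mod 100 n
    have hm0 : 0 ≤ PySem.Int.mod 100 n := PySem.Int.mod_nonneg 100 hn
    have hmlt : PySem.Int.mod 100 n < n := PySem.Int.mod_lt 100 hn
    set b := PySem.Int.floordiv 100 n with hb
    set m := PySem.Int.mod 100 n with hmdef
    have hrem : 100 - b * n = m := by omega
    rw [hrem]
    -- A's side reduces to two homogeneous blocks via the fold lemma
    have hm : m = ((m.toNat : Nat) : Int) := by omega
    have hA : (PySem.List.pyRange 0 m 1).foldl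
        (fun ps i => ps.set i.toNat (ps.getD i.toNat 0 + 1)) (List.replicate n.toNat b)
        = List.replicate m.toNat (b + 1) ++ List.replicate (n - m).toNat b := by
      have := incr_fold_blocks b m.toNat 0 n.toNat (by omega)
      simp only [Nat.cast_zero, zero_add, List.replicate_zero, Nat.sub_zero, List.nil_append] at this
      have e3 : n.toNat - m.toNat = (n - m).toNat := by omega
      rw [hm, this, e3]
      simp only [Int.toNat_natCast]
      rw [← hm]
    rw [hA]
    -- B's side equals the same blocks, element by element
    rw [PySem.List.pyRange_one]
    symm
    apply List.ext_getElem
    · simp; omega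
    · intro i hi1 hi2
      have hin : i < n.toNat := by simpa using hi1
      simp only [List.getElem_map, List.getElem_range]
      rw [formula_val n b m (0 + (i : Int)) hn (by omega) hm0 hmlt (by omega) (by omega)]
      by_cases hc : (0 + (i : Int)) < m
      · rw [if_pos hc, List.getElem_append_left (by simp; omega), List.getElem_replicate]
      · rw [if_neg hc, List.getElem_append_right (by simp; omega), List.getElem_replicate]
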